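-- pv_equiv track=rewrite | github.com/Poweski/Clobber | main.py | heuristic_W_1
-- ===== SOURCE A (Python) =====
-- DIRECTIONS = [(-1, -1), (1, 1), (1, -1), (-1, 1)]
--
-- def get_opponent(player):
--     return 'W' if player == 'B' else 'B'
--
-- def heuristic_W_1(board, player):
--     opp = get_opponent(player)
--     safe = 0
--     for r in range(len(board)):
--         for c in range(len(board[0])):
--             if board[r][c] == player:
--                 is_safe = True
--                 for dr, dc in DIRECTIONS:
--                     nr, nc = r + dr, c + dc
--                     if 0 <= nr < len(board) and 0 <= nc < len(board[0]):
--                         if board[nr][nc] == opp: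
--                             is_safe = False
--                 if is_safe:
--                     safe += 1
--     return safe
-- ===== SOURCE B (Python) =====
-- def heuristic_W_1(board, player):
--     opp = 'W' if player == 'B' else 'B'
--     rows = len(board)
--     cols = len(board[0]) if board else 0
--     threatened = set()
--     for r in range(rows):
--         for c in range(cols):
--             if board[r][c] == opp:
--                 for dr, dc in ((-1, -1), (-1, 1), (1, -1), (1, 1)):
--                     nr, nc = r + dr, c + dc
--                     if 0 <= nr < rows and 0 <= nc < cols:
--                         threatened.add((nr, nc))
--     count = 0
--     for r in range(rows):
--         for c in range(cols):
--             if board[r][c] == player and (r, c) not in threatened: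
--                 count += 1
--     return count
-- ===== Notes on version B (the rewrite author's own statement) =====
-- stated objective: alternative
-- what changed: Inverts A's per-piece gather over diagonal neighbors into a scatter: one pass marks every cell diagonally adjacent to an opponent piece in a 'threatened' set, a second pass counts player pieces not in the set, replacing the inner 4-direction scan per player piece by set membership.
import Mathlib
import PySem

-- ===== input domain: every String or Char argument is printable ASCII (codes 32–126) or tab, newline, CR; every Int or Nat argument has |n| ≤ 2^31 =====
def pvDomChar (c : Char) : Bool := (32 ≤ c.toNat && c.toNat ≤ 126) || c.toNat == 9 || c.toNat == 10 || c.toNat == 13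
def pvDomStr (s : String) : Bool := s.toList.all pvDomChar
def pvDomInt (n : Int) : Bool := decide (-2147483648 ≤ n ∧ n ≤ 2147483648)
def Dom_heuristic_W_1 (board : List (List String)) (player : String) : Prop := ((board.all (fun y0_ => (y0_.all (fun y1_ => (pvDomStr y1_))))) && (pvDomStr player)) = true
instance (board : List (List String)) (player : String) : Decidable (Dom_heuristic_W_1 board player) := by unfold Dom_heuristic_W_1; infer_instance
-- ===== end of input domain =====

-- B replaces A's per-piece gather over diagonal neighbours by a scatter pass that marks
-- every cell diagonally adjacent to an opponent piece in a set, then counts unmarked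
-- player pieces (objective: alternative decomposition, same asymptotic cost).


-- ===== PORT A =====
def DIRECTIONS : List (Int × Int) := [(-1, -1), (1, 1), (1, -1), (-1, 1)]

def get_opponent (player : String) : String := if player == "B" then "W" else "B"

def heuristic_W_1 (board : List (List String)) (player : String) : Int :=
  let opp := get_opponent player
  (PySem.List.pyRange 0 (board.length : Int) 1).foldl (fun safe r =>
    (PySem.List.pyRange 0 ((board.headD []).length : Int) 1).foldl (fun safe c =>
      if PySem.List.pyGetD (PySem.List.pyGetD board r []) c "" = player then
        let is_safe := DIRECTIONS.foldl (fun is_safe dd =>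
          let nr := r + dd.1
          let nc := c + dd.2
          if 0 ≤ nr ∧ nr < (board.length : Int) ∧ 0 ≤ nc ∧ nc < ((board.headD []).length : Int) then
            if PySem.List.pyGetD (PySem.List.pyGetD board nr []) nc "" = opp then false else is_safe
          else is_safe) true
        if is_safe then safe + 1 else safe
      else safe) safe) 0

-- ===== PORT B =====
def pvDirs : List (Int × Int) := [(-1, -1), (-1, 1), (1, -1), (1, 1)]

-- the scatter pass: the set of cells diagonally adjacent to an opponent piece
def pvThreat (board : List (List String)) (opp : String) (rows cols : Int) : PySem.Set (Int × Int) :=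
  (PySem.List.pyRange 0 rows 1).foldl (fun s r =>
    (PySem.List.pyRange 0 cols 1).foldl (fun s c =>
      if PySem.List.pyGetD (PySem.List.pyGetD board r []) c "" = opp then
        pvDirs.foldl (fun s dd =>
          -- nr, nc = r + dr, c + dc inlined
          if 0 ≤ r + dd.1 ∧ r + dd.1 < rows ∧ 0 ≤ c + dd.2 ∧ c + dd.2 < cols
          then PySem.Set.add s (r + dd.1, c + dd.2) else s) s
      else s) s) PySem.Set.empty

def heuristic_W_1_alt (board : List (List String)) (player : String) : Int :=
  let opp := if player == "B" then "W" else "B"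
  let rows : Int := board.length
  let cols : Int := (board.headD []).length
  let threatened := pvThreat board opp rows cols
  (PySem.List.pyRange 0 rows 1).foldl (fun count r =>
    (PySem.List.pyRange 0 cols 1).foldl (fun count c =>
      if PySem.List.pyGetD (PySem.List.pyGetD board r []) c "" = player ∧ (r, c) ∉ threatened
      then count + 1 else count) count) 0

-- ===== PRECONDITION & SPEC =====
-- Pre_ excludes exactly the ragged boards (a row shorter than row 0), on which the
-- Python A raises IndexError (and the Python B raises there as well).
def Pre_heuristic_W_1 (board : List (List String)) (player : String) : Prop :=
  ∀ row ∈ board, (board.headD []).length ≤ row.length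
instance (board : List (List String)) (player : String) : Decidable (Pre_heuristic_W_1 board player) := by unfold Pre_heuristic_W_1; infer_instance
def pvWitness_heuristic_W_1 : List (List String) × String := ([["B", "W"], ["W", "."]], "B")

def Spec_heuristic_W_1 (board : List (List String)) (player : String) (out : Int) : Prop := out = heuristic_W_1_alt board player
instance (board : List (List String)) (player : String) (out : Int) : Decidable (Spec_heuristic_W_1 board player out) := by unfold Spec_heuristic_W_1; infer_instance

-- ===== CLAIM (what is proved, stated in full; the proofs are below) =====
def Claim_equal_heuristic_W_1 : Prop := ∀ (board : List (List String)) (player : String), Dom_heuristic_W_1 board player → Pre_heuristic_W_1 board player → Spec_heuristic_W_1 board player (heuristic_W_1 board player)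

-- ===== LEMMAS AND PROOFS =====

-- A's inner 4-direction loop computes "still true and no direction fires"
theorem pvFoldSafe (p q : Int × Int → Prop) [DecidablePred p] [DecidablePred q]
    (l : List (Int × Int)) (b : Bool) :
    l.foldl (fun is_safe dd => if p dd then (if q dd then false else is_safe) else is_safe) b
      = (b && !l.any (fun dd => decide (p dd) && decide (q dd))) := by
  induction l generalizing b with
  | nil => simp
  | cons h t ih =>
    simp only [List.foldl_cons, List.any_cons]
    rw [ih]
    split_ifs <;> simp_all

-- membership in a fold whose step only ever adds elements
theorem pvMemFoldl {α β : Type} (g : List β → α → List β) (G : α → β → Prop)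
    (hg : ∀ s c x, x ∈ g s c ↔ x ∈ s ∨ G c x) (l : List α) (s0 : List β) (x : β) :
    x ∈ l.foldl g s0 ↔ x ∈ s0 ∨ ∃ c ∈ l, G c x := by
  induction l generalizing s0 with
  | nil => simp
  | cons h t ih =>
    simp only [List.foldl, List.mem_cons]
    rw [ih, hg]
    constructor
    · rintro ((h1 | h1) | ⟨c, hc, h1⟩)
      exacts [Or.inl h1, Or.inr ⟨h, Or.inl rfl, h1⟩, Or.inr ⟨c, Or.inr hc, h1⟩]
    · rintro (h1 | ⟨c, (rfl | hc), h1⟩)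
      exacts [Or.inl (Or.inl h1), Or.inl (Or.inr h1), Or.inr ⟨c, hc, h1⟩]

-- characterisation of the threatened set
theorem pvMemThreat (board : List (List String)) (opp : String) (rows cols : Int)
    (x : Int × Int) :
    x ∈ pvThreat board opp rows cols ↔
      ∃ r, (0 ≤ r ∧ r < rows) ∧ ∃ c, (0 ≤ c ∧ c < cols) ∧
        PySem.List.pyGetD (PySem.List.pyGetD board r []) c "" = opp ∧
        ∃ dd ∈ pvDirs, (0 ≤ r + dd.1 ∧ r + dd.1 < rows ∧ 0 ≤ c + dd.2 ∧ c + dd.2 < cols) ∧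
          x = (r + dd.1, c + dd.2) := by
  unfold pvThreat
  rw [pvMemFoldl _ (fun r x => ∃ c, (0 ≤ c ∧ c < cols) ∧
        PySem.List.pyGetD (PySem.List.pyGetD board r []) c "" = opp ∧
        ∃ dd ∈ pvDirs, (0 ≤ r + dd.1 ∧ r + dd.1 < rows ∧ 0 ≤ c + dd.2 ∧ c + dd.2 < cols) ∧
          x = (r + dd.1, c + dd.2))]
  · simp [PySem.Set.empty, PySem.List.mem_pyRange_one]
  · intro s r x
    rw [pvMemFoldl _ (fun c x =>
        PySem.List.pyGetD (PySem.List.pyGetD board r []) c "" = opp ∧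
        ∃ dd ∈ pvDirs, (0 ≤ r + dd.1 ∧ r + dd.1 < rows ∧ 0 ≤ c + dd.2 ∧ c + dd.2 < cols) ∧
          x = (r + dd.1, c + dd.2))]
    · simp [PySem.List.mem_pyRange_one]
    · intro s c x
      split_ifs with hcell
      · rw [pvMemFoldl _ (fun dd x =>
            (0 ≤ r + dd.1 ∧ r + dd.1 < rows ∧ 0 ≤ c + dd.2 ∧ c + dd.2 < cols) ∧
              x = (r + dd.1, c + dd.2))]
        · simp [hcell]
        · intro s dd x
          split_ifs with hb
          · simp only [PySem.Set.mem_add, hb, true_and]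
          · simp [hb]
      · simp [hcell]

-- the key pointwise fact: a player cell fails A's safety scan iff it is in B's threatened set
theorem pvKey (board : List (List String)) (opp : String) (r c : Int)
    (hr : 0 ≤ r ∧ r < (board.length : Int))
    (hc : 0 ≤ c ∧ c < ((board.headD []).length : Int)) :
    (DIRECTIONS.any (fun dd =>
        decide (0 ≤ r + dd.1 ∧ r + dd.1 < (board.length : Int) ∧
                0 ≤ c + dd.2 ∧ c + dd.2 < ((board.headD []).length : Int)) &&
        decide (PySem.List.pyGetD (PySem.List.pyGetD board (r + dd.1) []) (c + dd.2) "" = opp))) = true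
      ↔ (r, c) ∈ pvThreat board opp (board.length : Int) ((board.headD []).length : Int) := by
  rw [pvMemThreat]
  constructor
  · intro h
    rw [List.any_eq_true] at h
    obtain ⟨dd, hdd, hdec⟩ := h
    simp only [Bool.and_eq_true, decide_eq_true_eq] at hdec
    obtain ⟨⟨hb1, hb2, hb3, hb4⟩, hcell⟩ := hdec
    refine ⟨r + dd.1, ⟨hb1, hb2⟩, c + dd.2, ⟨hb3, hb4⟩, hcell, (-dd.1, -dd.2), ?_, ?_, ?_⟩
    · fin_cases hdd <;> decide
    · exact ⟨by omega, by omega, by omega, by omega⟩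
    · rw [Prod.mk.injEq]; constructor <;> ring
  · rintro ⟨r', hr', c', hc', hcell, dd, hdd, ⟨hb1, hb2, hb3, hb4⟩, hx⟩
    rw [Prod.mk.injEq] at hx
    obtain ⟨h1, h2⟩ := hx
    rw [List.any_eq_true]
    refine ⟨(-dd.1, -dd.2), ?_, ?_⟩
    · fin_cases hdd <;> decide
    · simp only [Bool.and_eq_true, decide_eq_true_eq]
      have e1 : r + -dd.1 = r' := by omega
      have e2 : c + -dd.2 = c' := by omega
      exact ⟨⟨by omega, by omega, by omega, by omega⟩, by rw [e1, e2]; exact hcell⟩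

-- ===== VERDICT (by name: the statement is the Claim_ definition above) =====
theorem heuristic_W_1_spec : Claim_equal_heuristic_W_1 := by
  intro board player _ _
  unfold Spec_heuristic_W_1 heuristic_W_1 heuristic_W_1_alt get_opponent
  apply PySem.List.foldl_congr_mem
  intro acc r hrmem
  apply PySem.List.foldl_congr_mem
  intro acc2 c hcmem
  rw [PySem.List.mem_pyRange_one] at hrmem hcmem
  simp only []
  rw [pvFoldSafe (fun dd => 0 ≤ r + dd.1 ∧ r + dd.1 < (board.length : Int) ∧
        0 ≤ c + dd.2 ∧ c + dd.2 < ((board.headD []).length : Int))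
      (fun dd => PySem.List.pyGetD (PySem.List.pyGetD board (r + dd.1) []) (c + dd.2) "" = (if player == "B" then "W" else "B"))]
  have hkey := pvKey board (if player == "B" then "W" else "B") r c hrmem hcmem
  by_cases hp : PySem.List.pyGetD (PySem.List.pyGetD board r []) c "" = player
  · rw [if_pos hp]
    by_cases hb : (DIRECTIONS.any (fun dd =>
        decide (0 ≤ r + dd.1 ∧ r + dd.1 < (board.length : Int) ∧
                0 ≤ c + dd.2 ∧ c + dd.2 < ((board.headD []).length : Int)) &&
        decide (PySem.List.pyGetD (PySem.List.pyGetD board (r + dd.1) []) (c + dd.2) "" = (if player == "B" then "W" else "B")))) = true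
    · have ht := hkey.mp hb
      rw [if_neg (by simp only [hb]; decide), if_neg (fun h => h.2 ht)]
    · have ht : (r, c) ∉ pvThreat board (if player == "B" then "W" else "B") (board.length : Int) ((board.headD []).length : Int) :=
        fun m => hb (hkey.mpr m)
      rw [if_pos (by simp only [Bool.not_eq_true] at hb; simp only [hb]; decide), if_pos ⟨hp, ht⟩]
  · rw [if_neg hp, if_neg (fun h => hp h.1)]
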